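-- pv_equiv track=rewrite | github.com/sendwealth/wechat-ai-writer | src/utils/json_parser.py | _close_brackets
-- ===== SOURCE A (Python) =====
-- def _close_brackets(text: str) -> str:
--     """补全未闭合的 [] 和 {}。"""
--     stack = []
--     in_string = False
--     escape_next = False
--
--     for ch in text:
--         if escape_next:
--             escape_next = False
--             continue
--         if ch == '\\':
--             escape_next = True
--             continue
--         if ch == '"':
--             in_string = not in_string
--             continue
--         if in_string:
--             continue
--         if ch in '{[':
--             stack.append(ch)
--         elif ch == '}' and stack and stack[-1] == '{':
--             stack.pop()
--         elif ch == ']' and stack and stack[-1] == '[':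
--             stack.pop()
--
--     # 反向补全
--     for bracket in reversed(stack):
--         if bracket == '{':
--             text += '}'
--         elif bracket == '[':
--             text += ']'
--
--     return text
-- ===== SOURCE B (Python) =====
-- _OPEN = {'}': '{', ']': '['}
-- _CLOSE = {'{': '}', '[': ']'}
--
--
-- def _close_brackets(text: str) -> str:
--     """补全未闭合的 [] 和 {}。 Rewriting algorithm: lex out the brackets, then
--     repeatedly cancel the leftmost closer against the opener just before it
--     (or drop it if it does not match); the surviving openers give the suffix."""
--     # phase 1: the bracket characters lying outside string literals
--     toks = []
--     in_string = False
--     escape = False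
--     for ch in text:
--         if escape:
--             escape = False
--         elif ch == '\\':
--             escape = True
--         elif ch == '"':
--             in_string = not in_string
--         elif not in_string and ch in '{}[]':
--             toks.append(ch)
--     # phase 2: cancel the leftmost closer until only openers remain
--     while True:
--         j = next((k for k, t in enumerate(toks) if t in '}]'), None)
--         if j is None:
--             break
--         if j > 0 and toks[j - 1] == _OPEN[toks[j]]:
--             del toks[j - 1:j + 1]
--         else:
--             del toks[j]
--     return text + ''.join(_CLOSE[t] for t in reversed(toks))
-- ===== Notes on version B (the rewrite author's own statement) =====
-- stated objective: alternative
-- what changed: A fuses quote-handling and a single-pass opener stack in one loop; B keeps no stack at all: it lexes the brackets outside string literals into a token list, then repeatedly rewrites that list by cancelling the leftmost closer against the opener immediately before it (dropping it when it does not match) until only openers remain, and maps those to closers.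
import Mathlib
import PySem

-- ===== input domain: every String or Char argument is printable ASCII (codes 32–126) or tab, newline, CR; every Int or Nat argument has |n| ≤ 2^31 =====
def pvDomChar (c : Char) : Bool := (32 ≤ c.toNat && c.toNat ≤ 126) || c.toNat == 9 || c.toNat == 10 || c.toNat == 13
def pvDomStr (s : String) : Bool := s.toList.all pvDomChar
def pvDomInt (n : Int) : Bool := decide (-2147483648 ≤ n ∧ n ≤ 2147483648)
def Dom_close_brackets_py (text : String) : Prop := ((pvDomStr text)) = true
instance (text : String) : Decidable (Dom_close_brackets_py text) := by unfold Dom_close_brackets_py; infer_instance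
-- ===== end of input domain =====

-- B replaces A's single-pass opener stack by a lexing pass plus a leftmost-closer
-- cancellation rewriting of the bracket token list (alternative, not faster);
-- the return value is reproduced exactly on every input.

-- ===== PORT A =====
-- A's single fused loop: state = (stack with top at the END, in_string, escape_next)
def aLoop : List Char → List Char → Bool → Bool → List Char
  | [], st, _, _ => st
  | c :: cs, st, s, e =>
    if e then aLoop cs st s false
    else if c = '\\' then aLoop cs st s true
    else if c = '"' then aLoop cs st (!s) e
    else if s then aLoop cs st s e
    else if c = '{' ∨ c = '[' then aLoop cs (st ++ [c]) s e
    else if c = '}' ∧ st.getLast? = some '{' then aLoop cs st.dropLast s e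
    else if c = ']' ∧ st.getLast? = some '[' then aLoop cs st.dropLast s e
    else aLoop cs st s e

-- A's second loop over reversed(stack), appending a closer per bracket
def aClosers : List Char → List Char
  | [] => []
  | b :: bs => (if b = '{' then ['}'] else if b = '[' then [']'] else []) ++ aClosers bs

def close_brackets_py (text : String) : String :=
  String.mk (text.toList ++ aClosers (aLoop text.toList [] false false).reverse)

-- ===== PORT B =====
-- B phase 1: lex out exactly the bracket characters that lie outside string literals
def bLex : List Char → Bool → Bool → List Char
  | [], _, _ => []
  | c :: cs, s, e =>
    if e then bLex cs s false
    else if c = '\\' then bLex cs s true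
    else if c = '"' then bLex cs (!s) e
    else if !s ∧ (c = '{' ∨ c = '}' ∨ c = '[' ∨ c = ']') then c :: bLex cs s e
    else bLex cs s e

def bIsOpen (c : Char) : Bool := c == '{' || c == '['

-- the opener that the closer c cancels ('"' is a never-matching default)
def bOpenOf (c : Char) : Char := if c = '}' then '{' else if c = ']' then '[' else '"'

-- B phase 2: find the leftmost closer (the prefix before it holds only openers),
-- cancel it with the opener just before it, or drop it if it does not match
def bReduce (ts : List Char) : List Char :=
  match h : ts.dropWhile bIsOpen with
  | [] => ts
  | c :: rest =>
    let pre := ts.takeWhile bIsOpen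
    if pre.getLast? = some (bOpenOf c) then bReduce (pre.dropLast ++ rest)
    else bReduce (pre ++ rest)
termination_by ts.length
decreasing_by
  · have hts := List.takeWhile_append_dropWhile (p := bIsOpen) (l := ts)
    rw [h] at hts
    have hlen := congrArg List.length hts
    simp only [List.length_append, List.length_cons] at hlen
    simp only [List.length_append, List.length_dropLast]
    omega
  · have hts := List.takeWhile_append_dropWhile (p := bIsOpen) (l := ts)
    rw [h] at hts
    have hlen := congrArg List.length hts
    simp only [List.length_append, List.length_cons] at hlen
    simp only [List.length_append]
    omega

def close_brackets_py_alt (text : String) : String :=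
  String.mk (text.toList ++ (bReduce (bLex text.toList false false)).reverse.map
    (fun b => if b = '{' then '}' else ']'))

-- ===== PRECONDITION & SPEC =====
def Spec_close_brackets_py (text : String) (out : String) : Prop := out = close_brackets_py_alt text
instance (text : String) (out : String) : Decidable (Spec_close_brackets_py text out) := by unfold Spec_close_brackets_py; infer_instance

-- ===== CLAIM (what is proved, stated in full; the proofs are below) =====
def Claim_equal_close_brackets_py : Prop := ∀ (text : String), Dom_close_brackets_py text → Spec_close_brackets_py text (close_brackets_py text)

-- ===== LEMMAS AND PROOFS =====

-- ghost intermediate: the one-pass matching stack (top at the HEAD) over the token list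
def bRun : List Char → List Char → List Char
  | st, [] => st
  | st, t :: ts =>
    if t = '{' ∨ t = '[' then bRun (t :: st) ts
    else
      match st with
      | top :: rest =>
        if (t = '}' ∧ top = '{') ∨ (t = ']' ∧ top = '[') then bRun rest ts else bRun st ts
      | [] => bRun st ts

-- A's fused loop equals: lex first, then run the stack (bRun's stack is A's stack reversed).
theorem aLoop_eq_bRun (cs : List Char) : ∀ (st : List Char) (s e : Bool),
    aLoop cs st.reverse s e = (bRun st (bLex cs s e)).reverse := by
  induction cs with
  | nil => intro st s e; simp [aLoop, bLex, bRun]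
  | cons c cs ih =>
    intro st s e
    by_cases he : e = true
    · subst he; simp [aLoop, bLex, ih]
    · simp at he; subst he
      by_cases hb : c = '\\'
      · subst hb; simp [aLoop, bLex, ih]
      · by_cases hq : c = '"'
        · subst hq; simp [aLoop, bLex, hb, ih]
        · by_cases hs : s = true
          · subst hs; simp [aLoop, bLex, hb, hq, ih]
          · simp at hs; subst hs
            by_cases ho : c = '{' ∨ c = '['
            · have : aLoop (c :: cs) st.reverse false false
                  = aLoop cs (st.reverse ++ [c]) false false := by
                simp [aLoop, hb, hq, ho]
              rw [this]
              have h2 : bLex (c :: cs) false false = c :: bLex cs false false := by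
                rcases ho with h | h <;> simp [bLex, h]
              rw [h2]
              have h3 : bRun st (c :: bLex cs false false)
                  = bRun (c :: st) (bLex cs false false) := by
                simp [bRun, ho]
              rw [h3]
              have h4 : st.reverse ++ [c] = (c :: st).reverse := by simp
              rw [h4]; exact ih (c :: st) false false
            · -- c is not an opener
              by_cases hc : c = '}' ∨ c = ']'
              · have h2 : bLex (c :: cs) false false = c :: bLex cs false false := by
                  rcases hc with h | h <;> simp [bLex, h]
                rw [h2]
                cases st with
                | nil =>
                  have hA : aLoop (c :: cs) ([] : List Char).reverse false false
                      = aLoop cs ([] : List Char).reverse false false := by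
                    simp [aLoop, hb, hq, ho]
                  have hB : bRun ([] : List Char) (c :: bLex cs false false)
                      = bRun ([] : List Char) (bLex cs false false) := by
                    have : ¬ (c = '{' ∨ c = '[') := ho
                    simp [bRun, this]
                  rw [hA, hB]; exact ih [] false false
                | cons top rest =>
                  by_cases hm : (c = '}' ∧ top = '{') ∨ (c = ']' ∧ top = '[')
                  · have hA : aLoop (c :: cs) (top :: rest).reverse false false
                        = aLoop cs ((top :: rest).reverse).dropLast false false := by
                      rcases hm with ⟨h1, h2⟩ | ⟨h1, h2⟩ <;>
                        simp [aLoop, h1, h2]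
                    have hB : bRun (top :: rest) (c :: bLex cs false false)
                        = bRun rest (bLex cs false false) := by
                      simp [bRun, ho, hm]
                    have hd : ((top :: rest).reverse).dropLast = rest.reverse := by
                      simp
                    rw [hA, hB, hd]; exact ih rest false false
                  · have hA : aLoop (c :: cs) (top :: rest).reverse false false
                        = aLoop cs (top :: rest).reverse false false := by
                      have hg : (top :: rest).reverse.getLast? = some top := by
                        simp [List.getLast?_concat]
                      by_cases h1 : c = '}'
                      · have h2 : ¬ top = '{' := fun h => hm (Or.inl ⟨h1, h⟩)
                        simp [aLoop, h1, h2]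
                      · by_cases h3 : c = ']'
                        · have h4 : ¬ top = '[' := fun h => hm (Or.inr ⟨h3, h⟩)
                          simp [aLoop, h3, h4]
                        · simp [aLoop, hb, hq, ho, h1, h3]
                    have hB : bRun (top :: rest) (c :: bLex cs false false)
                        = bRun (top :: rest) (bLex cs false false) := by
                      simp [bRun, ho, hm]
                    rw [hA, hB]; exact ih (top :: rest) false false
              · -- c is no bracket at all: both skip it
                have hA : aLoop (c :: cs) st.reverse false false
                    = aLoop cs st.reverse false false := by
                  have h1 : ¬ c = '}' := fun h => hc (Or.inl h)
                  have h2 : ¬ c = ']' := fun h => hc (Or.inr h)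
                  simp [aLoop, hb, hq, ho, h1, h2]
                have hB : bLex (c :: cs) false false = bLex cs false false := by
                  have : ¬ (c = '{' ∨ c = '}' ∨ c = '[' ∨ c = ']') := by
                    rintro (h | h | h | h)
                    · exact ho (Or.inl h)
                    · exact hc (Or.inl h)
                    · exact ho (Or.inr h)
                    · exact hc (Or.inr h)
                  simp [bLex, hb, hq, this]
                rw [hA, hB]; exact ih st false false

-- everything bRun leaves on the stack is an opener (only openers are ever pushed)
theorem bRun_openers : ∀ (ts st : List Char),
    (∀ x ∈ st, x = '{' ∨ x = '[') → ∀ x ∈ bRun st ts, x = '{' ∨ x = '[' := by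
  intro ts
  induction ts with
  | nil => intro st h; simpa [bRun] using h
  | cons t ts ih =>
    intro st h x
    by_cases ho : t = '{' ∨ t = '['
    · have : bRun st (t :: ts) = bRun (t :: st) ts := by simp [bRun, ho]
      rw [this]
      refine ih (t :: st) ?_ x
      intro y hy
      rcases List.mem_cons.mp hy with rfl | hy
      · exact ho
      · exact h y hy
    · cases st with
      | nil =>
        have : bRun ([] : List Char) (t :: ts) = bRun [] ts := by simp [bRun, ho]
        rw [this]; exact ih [] (by simp) x
      | cons top rest =>
        by_cases hm : (t = '}' ∧ top = '{') ∨ (t = ']' ∧ top = '[')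
        · have : bRun (top :: rest) (t :: ts) = bRun rest ts := by simp [bRun, ho, hm]
          rw [this]
          exact ih rest (fun y hy => h y (List.mem_cons_of_mem _ hy)) x
        · have : bRun (top :: rest) (t :: ts) = bRun (top :: rest) ts := by
            simp [bRun, ho, hm]
          rw [this]; exact ih (top :: rest) h x

-- on opener-only stacks A's closer loop is exactly B's map
theorem aClosers_eq_map (l : List Char) (h : ∀ x ∈ l, x = '{' ∨ x = '[') :
    aClosers l = l.map (fun b => if b = '{' then '}' else ']') := by
  induction l with
  | nil => simp [aClosers]
  | cons b bs ih =>
    have hb := h b (List.mem_cons_self)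
    have hbs := ih (fun x hx => h x (List.mem_cons_of_mem _ hx))
    rcases hb with rfl | rfl <;> simp [aClosers, hbs]

theorem dropWhile_all_append (f : Char → Bool) (p ts : List Char)
    (h : ∀ x ∈ p, f x = true) : (p ++ ts).dropWhile f = ts.dropWhile f := by
  induction p with
  | nil => simp
  | cons a p ih =>
    have ha := h a (List.mem_cons_self)
    simp [List.dropWhile, ha, ih (fun x hx => h x (List.mem_cons_of_mem _ hx))]

theorem takeWhile_all_append (f : Char → Bool) (p ts : List Char)
    (h : ∀ x ∈ p, f x = true) : (p ++ ts).takeWhile f = p ++ ts.takeWhile f := by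
  induction p with
  | nil => simp
  | cons a p ih =>
    have ha := h a (List.mem_cons_self)
    simp [List.takeWhile, ha, ih (fun x hx => h x (List.mem_cons_of_mem _ hx))]

-- the one-pass stack run is the leftmost-closer cancellation rewriting
theorem bRun_eq_bReduce : ∀ (n : ℕ) (ts p : List Char), ts.length ≤ n →
    (∀ x ∈ p, bIsOpen x = true) → (bRun p.reverse ts).reverse = bReduce (p ++ ts) := by
  intro n
  induction n with
  | zero =>
    intro ts p hn hp
    have : ts = [] := List.length_eq_zero_iff.mp (Nat.le_zero.mp hn)
    subst this
    have hd : (p ++ ([] : List Char)).dropWhile bIsOpen = [] := by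
      rw [dropWhile_all_append _ _ _ hp]; simp [List.dropWhile]
    rw [bReduce]
    split
    · simp [bRun]
    · next c rest heq => rw [hd] at heq; exact absurd heq (by simp)
  | succ n ih =>
    intro ts p hn hp
    cases ts with
    | nil =>
      have hd : (p ++ ([] : List Char)).dropWhile bIsOpen = [] := by
        rw [dropWhile_all_append _ _ _ hp]; simp [List.dropWhile]
      rw [bReduce]
      split
      · simp [bRun]
      · next c rest heq => rw [hd] at heq; exact absurd heq (by simp)
    | cons t ts =>
      have hn' : ts.length ≤ n := by simpa using hn
      by_cases ho : t = '{' ∨ t = '['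
      · have h1 : bRun p.reverse (t :: ts) = bRun ((p ++ [t]).reverse) ts := by
          simp [bRun, ho]
        have h2 : p ++ t :: ts = (p ++ [t]) ++ ts := by simp
        rw [h1, h2]
        exact ih ts (p ++ [t]) hn' (by
          intro x hx
          rcases List.mem_append.mp hx with hx | hx
          · exact hp x hx
          · simp at hx; subst hx
            rcases ho with h | h <;> simp [bIsOpen, h])
      · -- t is the leftmost non-opener: bReduce fires on it
        have hot : bIsOpen t = false := by
          simp [bIsOpen]
          constructor <;> [exact fun h => ho (Or.inl h); exact fun h => ho (Or.inr h)]
        have hd : (p ++ t :: ts).dropWhile bIsOpen = t :: ts := by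
          rw [dropWhile_all_append _ _ _ hp]; simp [List.dropWhile, hot]
        have htw : (p ++ t :: ts).takeWhile bIsOpen = p := by
          rw [takeWhile_all_append _ _ _ hp]; simp [List.takeWhile, hot]
        rw [bReduce]
        split
        · next heq => rw [hd] at heq; exact absurd heq (by simp)
        next c rest heq =>
        rw [hd] at heq
        obtain ⟨rfl, rfl⟩ : t = c ∧ ts = rest := by
          constructor <;> [exact (List.cons.injEq ..).mp heq |>.1; exact (List.cons.injEq ..).mp heq |>.2]
        simp only [htw]
        by_cases hm : p.getLast? = some (bOpenOf t)
        · -- the opener before t matches: both cancel the pair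
          rw [if_pos hm]
          rcases List.getLast?_eq_some_iff.mp hm with ⟨q, hq⟩
          have hmm : (t = '}' ∧ bOpenOf t = '{') ∨ (t = ']' ∧ bOpenOf t = '[') := by
            by_cases h1 : t = '}'
            · exact Or.inl ⟨h1, by simp [bOpenOf, h1]⟩
            · by_cases h2 : t = ']'
              · exact Or.inr ⟨h2, by simp [bOpenOf, h2, h1]⟩
              · -- t neither closer: then bOpenOf t = '"', impossible in opener list p
                exfalso
                have hquote : bOpenOf t = '"' := by simp [bOpenOf, h1, h2]
                have hmem : bOpenOf t ∈ p := by
                  rw [hq]; exact List.mem_append.mpr (Or.inr (by simp))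
                have hopen := hp _ hmem
                rw [hquote] at hopen
                simp [bIsOpen] at hopen
          have h1 : bRun p.reverse (t :: ts) = bRun q.reverse ts := by
            have : p.reverse = bOpenOf t :: q.reverse := by rw [hq]; simp
            rw [this]
            simp [bRun, ho, hmm]
          have h2 : p.dropLast = q := by rw [hq]; simp
          rw [h1, h2]
          exact ih ts q hn' (fun x hx => hp x (by rw [hq]; exact List.mem_append.mpr (Or.inl hx)))
        · -- no match: the closer (or stray character) is dropped
          rw [if_neg hm]
          have h1 : bRun p.reverse (t :: ts) = bRun p.reverse ts := by
            cases hpr : p.reverse with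
            | nil => simp [bRun, ho, hpr]
            | cons top rest =>
              have htop : p.getLast? = some top := by
                rw [← List.reverse_reverse p, hpr]; simp [List.getLast?_concat]
              have hnm : ¬ ((t = '}' ∧ top = '{') ∨ (t = ']' ∧ top = '[')) := by
                rintro (⟨h1, h2⟩ | ⟨h1, h2⟩)
                · exact hm (by rw [htop, h2, h1]; simp [bOpenOf])
                · exact hm (by rw [htop, h2, h1]; simp [bOpenOf])
              simp [bRun, ho, hpr, hnm]
          rw [h1]
          exact ih ts p hn' hp

-- ===== VERDICT (by name: the statement is the Claim_ definition above) =====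
theorem close_brackets_py_spec : Claim_equal_close_brackets_py := by
  intro text _
  unfold Spec_close_brackets_py close_brackets_py close_brackets_py_alt
  have h := aLoop_eq_bRun text.toList [] false false
  simp only [List.reverse_nil] at h
  have hred := bRun_eq_bReduce (bLex text.toList false false).length
      (bLex text.toList false false) [] le_rfl (by simp)
  simp only [List.reverse_nil, List.nil_append] at hred
  rw [h, List.reverse_reverse, ← hred, List.reverse_reverse]
  rw [aClosers_eq_map _ (bRun_openers _ _ (by simp))]
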